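-- pv_equiv track=rewrite | github.com/anita476/TPE3-SIA-72.27 | utils/visualization.py | _group_results
-- ===== SOURCE A (Python) =====
-- def _group_results(results):
--     """Group results by name. Runs with the same name are treated as different
--     seeds of the same config.
--
--     Returns a list of (name, [result, ...]) in original order.
--     """
--     groups = {}
--     order  = []
--     for r in results:
--         key = r["name"]
--         if key not in groups:
--             groups[key] = []
--             order.append(key)
--         groups[key].append(r)
--     return [(key, groups[key]) for key in order]
-- ===== SOURCE B (Python) =====
-- def _group_results(results):
--     """Group results by name, preserving first-seen order of names."""
--     names = list(dict.fromkeys(r["name"] for r in results))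
--     return [(n, [r for r in results if r["name"] == n]) for n in names]
-- ===== Notes on version B (the rewrite author's own statement) =====
-- stated objective: simpler
-- what changed: Replaces the single accumulate-into-dict-plus-order-list pass by a dedupe of the names followed by one filtering scan of the input per distinct name (two-line comprehension form).
import Mathlib
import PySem

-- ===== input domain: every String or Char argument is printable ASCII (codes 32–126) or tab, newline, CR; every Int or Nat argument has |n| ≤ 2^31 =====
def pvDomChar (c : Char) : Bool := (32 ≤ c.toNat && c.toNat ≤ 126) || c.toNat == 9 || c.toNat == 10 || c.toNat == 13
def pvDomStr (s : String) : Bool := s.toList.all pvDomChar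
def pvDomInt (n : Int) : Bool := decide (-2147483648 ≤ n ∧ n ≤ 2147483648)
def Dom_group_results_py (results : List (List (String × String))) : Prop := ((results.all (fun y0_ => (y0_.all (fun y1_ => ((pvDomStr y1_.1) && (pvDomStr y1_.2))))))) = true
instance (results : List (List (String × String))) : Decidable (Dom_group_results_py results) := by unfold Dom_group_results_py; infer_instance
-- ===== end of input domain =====

-- B groups by name via an ordered dedupe of the names followed by one filtering scan
-- per distinct name, instead of A's single accumulate-into-dict-plus-order-list pass
-- (objective: simpler; not faster).

-- r["name"] (both Pythons): first-match lookup in the row; Pre_ guarantees the key exists,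
-- so the `getD ""` default is never reached on admitted inputs.
def pvKey (r : List (String × String)) : String :=
  ((PySem.Dict.mk r).get? "name").getD ""

-- ===== PORT A =====
-- the body of A's `for r in results:` loop
def pvStepA (st : PySem.Dict String (List (List (String × String))) × List String)
    (r : List (String × String)) :
    PySem.Dict String (List (List (String × String))) × List String :=
  let key := pvKey r
  let st' := if st.1.contains key then st else (st.1.insert key [], st.2 ++ [key])
  (st'.1.modify key [] (fun v => v ++ [r]), st'.2)

def group_results_py (results : List (List (String × String))) : List (String × (List (List (String × String)))) :=
  let st := results.foldl pvStepA (PySem.Dict.empty, [])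
  st.2.map (fun key => (key, st.1.getD key []))

-- ===== PORT B =====
def group_results_py_alt (results : List (List (String × String))) : List (String × (List (List (String × String)))) :=
  let names := PySem.List.dedup (results.map pvKey)
  names.map (fun n => (n, results.filter (fun r => pvKey r == n)))

-- ===== PRECONDITION & SPEC =====
-- A raises KeyError on any row without the key "name"; Pre_ excludes exactly those inputs.
def Pre_group_results_py (results : List (List (String × String))) : Prop :=
  (results.all (fun r => r.any (fun p => p.1 == "name"))) = true
instance (results : List (List (String × String))) : Decidable (Pre_group_results_py results) := by unfold Pre_group_results_py; infer_instance
def pvWitness_group_results_py : (List (List (String × String))) :=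
  [[("name", "a"), ("x", "1")], [("name", "b")], [("name", "a"), ("x", "2")]]

def Spec_group_results_py (results : List (List (String × String))) (out : List (String × (List (List (String × String))))) : Prop := out = group_results_py_alt results
instance (results : List (List (String × String))) (out : List (String × (List (List (String × String))))) : Decidable (Spec_group_results_py results out) := by unfold Spec_group_results_py; infer_instance

-- ===== CLAIM (what is proved, stated in full; the proofs are below) =====
def Claim_equal_group_results_py : Prop := ∀ (results : List (List (String × String))), Dom_group_results_py results → Pre_group_results_py results → Spec_group_results_py results (group_results_py results)

-- ===== LEMMAS AND PROOFS =====

-- inserting an absent key with the default and then modifying it equals modifying it directly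
lemma insert_modify_absent {ν : Type}
    (d : PySem.Dict String ν) (k : String) (v0 : ν) (f : ν → ν)
    (h : d.contains k = false) :
    (d.insert k v0).modify k v0 f = d.modify k v0 f := by
  apply PySem.Dict.ext
  simp only [PySem.Dict.modify]
  rw [PySem.Dict.getD_insert_self, PySem.Dict.getD_of_not_contains _ _ h]
  rw [PySem.Dict.items_insert_of_contains _ _ (PySem.Dict.contains_insert_self d k v0),
      PySem.Dict.items_insert_of_not_contains _ _ h,
      PySem.Dict.items_insert_of_not_contains _ _ h,
      List.map_append]
  have hno : ∀ p ∈ d.items, ((p : String × ν).1 == k) = false := by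
    intro p hp
    have hk : p.1 ∈ d.keys := PySem.Dict.mem_keys_of_mem_items d hp
    by_contra hb
    have : p.1 = k := by
      cases hbe : (p.1 == k) with
      | false => exact absurd hbe hb
      | true => exact eq_of_beq hbe
    rw [this] at hk
    rw [(PySem.Dict.contains_iff_mem_keys d k).2 hk] at h
    exact Bool.true_eq_false.mp h
  have : d.items.map (fun p => if (p.1 == k) = true then (k, f v0) else p) = d.items := by
    conv_rhs => rw [← List.map_id d.items]
    apply List.map_congr_left
    intro p hp
    rw [hno p hp]
    simp
  rw [this]
  simp

-- A's fold splits into an independent dict fold and a Set.add fold over the names,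
-- given that the dict's keys and the order list have the same members.
lemma fold_split (l : List (List (String × String)))
    (d : PySem.Dict String (List (List (String × String)))) (o : List String)
    (h : ∀ k, d.contains k = true ↔ k ∈ o) :
    l.foldl pvStepA (d, o)
    = (l.foldl (fun d r => d.modify (pvKey r) [] (fun v => v ++ [r])) d,
       l.foldl (fun o r => PySem.Set.add o (pvKey r)) o) := by
  induction l generalizing d o with
  | nil => rfl
  | cons r t ih =>
    simp only [List.foldl_cons]
    by_cases hc : d.contains (pvKey r) = true
    · have hm : pvKey r ∈ o := (h _).1 hc
      have hstep : pvStepA (d, o) r = (d.modify (pvKey r) [] (fun v => v ++ [r]), o) := by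
        simp only [pvStepA, hc, if_true]
      rw [hstep, PySem.Set.add_of_mem hm]
      apply ih
      intro k
      rw [PySem.Dict.contains_modify]
      constructor
      · intro hk
        rcases Bool.or_eq_true_iff.mp hk with hk | hk
        · rw [eq_of_beq hk]; exact hm
        · exact (h k).1 hk
      · intro hk
        exact Bool.or_eq_true_iff.mpr (Or.inr ((h k).2 hk))
    · have hcf : d.contains (pvKey r) = false := Bool.eq_false_iff.mpr hc
      have hm : pvKey r ∉ o := fun hmem => hc ((h _).2 hmem)
      have hstep : pvStepA (d, o) r
          = (d.modify (pvKey r) [] (fun v => v ++ [r]), o ++ [pvKey r]) := by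
        simp only [pvStepA, hcf, Bool.false_eq_true, if_false]
        rw [insert_modify_absent _ _ _ _ hcf]
      rw [hstep, PySem.Set.add_of_not_mem hm]
      apply ih
      intro k
      rw [PySem.Dict.contains_modify]
      constructor
      · intro hk
        rcases Bool.or_eq_true_iff.mp hk with hk | hk
        · rw [eq_of_beq hk]; simp
        · exact List.mem_append_left _ ((h k).1 hk)
      · intro hk
        rcases List.mem_append.mp hk with hk | hk
        · exact Bool.or_eq_true_iff.mpr (Or.inr ((h k).2 hk))
        · have : k = pvKey r := List.mem_singleton.mp hk
          exact Bool.or_eq_true_iff.mpr (Or.inl (beq_iff_eq.mpr this))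

-- ===== VERDICT (by name: the statement is the Claim_ definition above) =====
theorem group_results_py_spec : Claim_equal_group_results_py := by
  intro results _ _
  unfold Spec_group_results_py
  simp only [group_results_py, group_results_py_alt]
  rw [fold_split results PySem.Dict.empty [] (by intro k; simp [PySem.Dict.contains_empty])]
  rw [← PySem.Set.update_map_eq_foldl_add, PySem.Set.update_nil_left, PySem.List.dedup_eq_ofList]
  apply List.map_congr_left
  intro n _
  have hfold :
      results.foldl (fun d r => d.modify (pvKey r) [] (fun v => v ++ [r])) PySem.Dict.empty
      = (results.map (fun r => (pvKey r, r))).foldl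
          (fun d p => d.modify p.1 [] (fun v => v ++ [p.2])) PySem.Dict.empty := by
    rw [List.foldl_map]
  rw [hfold, PySem.Dict.getD_foldl_modify_append, PySem.Dict.getD_empty]
  simp [List.filter_map, List.map_map, Function.comp_def]
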